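-- pv_equiv track=rewrite | github.com/markh-de/KiVar | plugin/kivar.py | get_choice_dict
-- ===== SOURCE A (Python) =====
-- def key_default():
--     return '*'
--
-- def get_choice_dict(vn_dict):
--     choices = {}
--
--     for ref in vn_dict:
--         for vn in vn_dict[ref]:
--             if not vn in choices:
--                 choices[vn] = []
--             for choice in vn_dict[ref][vn]:
--                 # In case the input dict still contains temporary data (such as default data), ignore it.
--                 if choice != key_default() and not choice in choices[vn]:
--                     choices[vn].append(choice)
--
--     return choices
-- ===== SOURCE B (Python) =====
-- def key_default():
--     return '*'
--
-- def get_choice_dict(vn_dict):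
--     # Phase 1: accumulate every choice (unfiltered) per variable name,
--     # registering each variable name the first time it is seen.
--     acc = {}
--     for ref in vn_dict:
--         for vn in vn_dict[ref]:
--             if vn not in acc:
--                 acc[vn] = []
--             acc[vn] = acc[vn] + [choice for choice in vn_dict[ref][vn]]
--     # Phase 2: drop the default sentinel and deduplicate keeping first occurrence.
--     return {vn: list(dict.fromkeys(c for c in raw if c != key_default()))
--             for vn, raw in acc.items()}
-- ===== Notes on version B (the rewrite author's own statement) =====
-- stated objective: alternative
-- what changed: Replaces A's inline 'append if not already present' dedup inside the choice loop with a two-phase decomposition: phase 1 only accumulates every raw choice list per variable name, phase 2 filters the '*' sentinel and deduplicates in one dict.fromkeys collapse per variable.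
import Mathlib
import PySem

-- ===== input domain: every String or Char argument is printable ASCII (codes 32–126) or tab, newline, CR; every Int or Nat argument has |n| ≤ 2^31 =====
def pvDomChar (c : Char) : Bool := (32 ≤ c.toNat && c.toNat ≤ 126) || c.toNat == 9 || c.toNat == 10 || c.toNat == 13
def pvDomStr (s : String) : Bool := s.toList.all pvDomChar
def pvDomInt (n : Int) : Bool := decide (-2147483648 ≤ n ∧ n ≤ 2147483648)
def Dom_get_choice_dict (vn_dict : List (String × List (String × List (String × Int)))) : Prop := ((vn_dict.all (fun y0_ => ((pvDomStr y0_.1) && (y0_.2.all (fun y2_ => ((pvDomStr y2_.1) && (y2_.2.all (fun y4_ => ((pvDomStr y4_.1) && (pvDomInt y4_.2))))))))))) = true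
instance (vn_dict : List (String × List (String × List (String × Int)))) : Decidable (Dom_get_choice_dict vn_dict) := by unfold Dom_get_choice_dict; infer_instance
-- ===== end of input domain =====

-- B replaces A's inline membership-test dedup with a two-phase accumulate-then-collapse
-- decomposition (objective: alternative; return values proved equal).

-- ===== PORT A =====
-- the body of A's innermost 'for choice in vn_dict[ref][vn]' loop;
-- choices[vn] is only read after vn was inserted, so 'getD vn []' is exact there
def gcdInner (vnk : String) (choices : PySem.Dict String (List String)) (choice : String × Int) : PySem.Dict String (List String) :=
  if choice.1 != "*" && !((choices.getD vnk []).contains choice.1) then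
    choices.insert vnk (choices.getD vnk [] ++ [choice.1])
  else choices

-- the body of A's 'for vn in vn_dict[ref]' loop
def gcdStepA (choices : PySem.Dict String (List String)) (vn : String × List (String × Int)) : PySem.Dict String (List String) :=
  let choices := if choices.contains vn.1 then choices else choices.insert vn.1 ([] : List String)
  vn.2.foldl (gcdInner vn.1) choices

def get_choice_dict (vn_dict : List (String × List (String × List (String × Int)))) : List (String × List String) :=
  (vn_dict.foldl (fun choices ref => ref.2.foldl gcdStepA choices) PySem.Dict.empty).items

-- ===== PORT B =====
-- the body of B's phase-1 'for vn in vn_dict[ref]' loop; acc[vn] is read after insertion, so getD is exact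
def gcdStepB (acc : PySem.Dict String (List String)) (vn : String × List (String × Int)) : PySem.Dict String (List String) :=
  let acc := if acc.contains vn.1 then acc else acc.insert vn.1 ([] : List String)
  acc.insert vn.1 (acc.getD vn.1 [] ++ vn.2.map (·.1))

-- phase 2's 'list(dict.fromkeys(c for c in raw if c != key_default()))' (dict.fromkeys
-- keeps distinct elements in first-occurrence order = PySem.Set.ofList)
def gcdCollapse (raw : List String) : List String :=
  PySem.Set.ofList (raw.filter (fun c => c != "*"))

def get_choice_dict_alt (vn_dict : List (String × List (String × List (String × Int)))) : List (String × List String) :=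
  (vn_dict.foldl (fun acc ref => ref.2.foldl gcdStepB acc) PySem.Dict.empty).items.map
    (fun p => (p.1, gcdCollapse p.2))

-- ===== PRECONDITION & SPEC =====
def Spec_get_choice_dict (vn_dict : List (String × List (String × List (String × Int)))) (out : List (String × List String)) : Prop := out = get_choice_dict_alt vn_dict
instance (vn_dict : List (String × List (String × List (String × Int)))) (out : List (String × List String)) : Decidable (Spec_get_choice_dict vn_dict out) := by unfold Spec_get_choice_dict; infer_instance

-- ===== CLAIM (what is proved, stated in full; the proofs are below) =====
def Claim_equal_get_choice_dict : Prop := ∀ (vn_dict : List (String × List (String × List (String × Int)))), Dom_get_choice_dict vn_dict → Spec_get_choice_dict vn_dict (get_choice_dict vn_dict)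

-- ===== LEMMAS AND PROOFS =====

-- the simulation invariant: A's dict is the pointwise collapse of B's accumulator
def gcdInv (d a : PySem.Dict String (List String)) : Prop :=
  d.keys = a.keys ∧ a.keys.Nodup ∧ ∀ k, d.getD k [] = gcdCollapse (a.getD k [])

theorem gcdCollapse_nil : gcdCollapse [] = [] := rfl

theorem gcdCollapse_append_singleton (raw : List String) (c : String) :
    gcdCollapse (raw ++ [c]) =
      if c != "*" && !((gcdCollapse raw).contains c) then gcdCollapse raw ++ [c]
      else gcdCollapse raw := by
  unfold gcdCollapse
  rw [List.filter_append]
  by_cases hstar : c = "*"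
  · subst hstar; simp
  · have h1 : (List.filter (fun c => c != "*") [c]) = [c] := by simp [hstar]
    rw [h1, PySem.Set.ofList_append_singleton, PySem.Set.add_eq_ite]
    by_cases hm : c ∈ PySem.Set.ofList (List.filter (fun c => c != "*") raw)
    · simp [hm]
    · simp [hm, hstar]

theorem gcdInner_one_getD_ne (vnk k : String) (hk : k ≠ vnk)
    (e : PySem.Dict String (List String)) (c : String × Int) :
    (gcdInner vnk e c).getD k [] = e.getD k [] := by
  unfold gcdInner
  split
  · exact PySem.Dict.getD_insert_of_ne _ _ _ hk
  · rfl

theorem gcdInner_one_getD_self (vnk : String) (e : PySem.Dict String (List String))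
    (c : String × Int) (raw : List String) (h : e.getD vnk [] = gcdCollapse raw) :
    (gcdInner vnk e c).getD vnk [] = gcdCollapse (raw ++ [c.1]) := by
  unfold gcdInner
  rw [h, gcdCollapse_append_singleton]
  by_cases hb : (c.1 != "*" && !(gcdCollapse raw).contains c.1) = true
  · rw [if_pos hb, if_pos hb, PySem.Dict.getD_insert_self]
  · rw [if_neg hb, if_neg hb, h]

theorem gcdInner_one_keys (vnk : String) (e : PySem.Dict String (List String))
    (c : String × Int) (h : e.contains vnk = true) :
    (gcdInner vnk e c).keys = e.keys := by
  unfold gcdInner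
  split
  · exact PySem.Dict.keys_insert_of_contains _ _ h
  · rfl

theorem gcdInner_one_contains (vnk : String) (e : PySem.Dict String (List String))
    (c : String × Int) (h : e.contains vnk = true) :
    (gcdInner vnk e c).contains vnk = true := by
  unfold gcdInner
  split
  · exact PySem.Dict.contains_insert_self _ _ _
  · exact h

theorem gcdInner_getD_ne (vnk k : String) (hk : k ≠ vnk)
    (cs : List (String × Int)) (e : PySem.Dict String (List String)) :
    (cs.foldl (gcdInner vnk) e).getD k [] = e.getD k [] := by
  induction cs generalizing e with
  | nil => rfl
  | cons c cs ih => rw [List.foldl_cons, ih, gcdInner_one_getD_ne _ _ hk]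

theorem gcdInner_getD_self (vnk : String) (cs : List (String × Int))
    (e : PySem.Dict String (List String)) (raw : List String)
    (h : e.getD vnk [] = gcdCollapse raw) :
    (cs.foldl (gcdInner vnk) e).getD vnk [] = gcdCollapse (raw ++ cs.map (·.1)) := by
  induction cs generalizing e raw with
  | nil => simpa using h
  | cons c cs ih =>
    rw [List.foldl_cons, List.map_cons, ← List.singleton_append, ← List.append_assoc]
    exact ih _ _ (gcdInner_one_getD_self _ _ _ _ h)

theorem gcdInner_keys (vnk : String) (cs : List (String × Int))
    (e : PySem.Dict String (List String)) (h : e.contains vnk = true) :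
    (cs.foldl (gcdInner vnk) e).keys = e.keys := by
  induction cs generalizing e with
  | nil => rfl
  | cons c cs ih =>
    rw [List.foldl_cons, ih _ (gcdInner_one_contains _ _ _ h), gcdInner_one_keys _ _ _ h]

theorem gcdStep_inv (d a : PySem.Dict String (List String))
    (vn : String × List (String × Int)) (h : gcdInv d a) :
    gcdInv (gcdStepA d vn) (gcdStepB a vn) := by
  obtain ⟨hkeys, hnd, hget⟩ := h
  have hcont : d.contains vn.1 = a.contains vn.1 := by
    rw [PySem.Dict.contains_eq_decide_mem_keys, PySem.Dict.contains_eq_decide_mem_keys, hkeys]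
  -- the state after the conditional [] insert on both sides
  set d1 := if d.contains vn.1 then d else d.insert vn.1 ([] : List String) with hd1
  set a1 := if a.contains vn.1 then a else a.insert vn.1 ([] : List String) with ha1
  have hkeys1 : d1.keys = a1.keys := by
    rw [hd1, ha1, hcont]
    by_cases hc : a.contains vn.1 = true
    · simp [hc, hkeys]
    · rw [Bool.not_eq_true] at hc
      simp only [hc, if_neg Bool.false_ne_true]
      rw [PySem.Dict.keys_insert_of_not_contains _ _ (by rw [hcont]; exact hc),
        PySem.Dict.keys_insert_of_not_contains _ _ hc, hkeys]
  have hnd1 : a1.keys.Nodup := by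
    rw [ha1]; split
    · exact hnd
    · exact PySem.Dict.nodup_keys_insert _ _ _ hnd
  have hget1 : ∀ k, d1.getD k [] = gcdCollapse (a1.getD k []) := by
    intro k
    rw [hd1, ha1, hcont]
    by_cases hc : a.contains vn.1 = true
    · simp [hc, hget k]
    · rw [Bool.not_eq_true] at hc
      simp only [hc, if_neg Bool.false_ne_true]
      rw [PySem.Dict.getD_insert, PySem.Dict.getD_insert]
      by_cases hk : k = vn.1
      · simp [hk, gcdCollapse_nil]
      · simp [hk, hget k]
  have hc1a : a1.contains vn.1 = true := by
    rw [ha1]; split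
    · assumption
    · exact PySem.Dict.contains_insert_self _ _ _
  have hc1d : d1.contains vn.1 = true := by
    rw [PySem.Dict.contains_eq_decide_mem_keys, hkeys1,
      ← PySem.Dict.contains_eq_decide_mem_keys]
    exact hc1a
  refine ⟨?_, ?_, ?_⟩
  · show (vn.2.foldl (gcdInner vn.1) d1).keys = (a1.insert vn.1 _).keys
    rw [gcdInner_keys _ _ _ hc1d, PySem.Dict.keys_insert_of_contains _ _ hc1a, hkeys1]
  · show (a1.insert vn.1 _).keys.Nodup
    rw [PySem.Dict.keys_insert_of_contains _ _ hc1a]; exact hnd1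
  · intro k
    show (vn.2.foldl (gcdInner vn.1) d1).getD k [] = gcdCollapse ((a1.insert vn.1 _).getD k [])
    rw [PySem.Dict.getD_insert]
    by_cases hk : k = vn.1
    · subst hk
      rw [if_pos rfl]
      exact gcdInner_getD_self _ _ _ _ (hget1 vn.1)
    · rw [if_neg hk, gcdInner_getD_ne _ _ hk, hget1 k]

theorem gcdFoldl_inv (l : List (String × List (String × Int)))
    (d a : PySem.Dict String (List String)) (h : gcdInv d a) :
    gcdInv (l.foldl gcdStepA d) (l.foldl gcdStepB a) := by
  induction l generalizing d a with
  | nil => exact h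
  | cons vn l ih => exact ih _ _ (gcdStep_inv _ _ _ h)

theorem gcdOuter_inv (ll : List (String × List (String × List (String × Int))))
    (d a : PySem.Dict String (List String)) (h : gcdInv d a) :
    gcdInv (ll.foldl (fun d ref => ref.2.foldl gcdStepA d) d)
      (ll.foldl (fun a ref => ref.2.foldl gcdStepB a) a) := by
  induction ll generalizing d a with
  | nil => exact h
  | cons r ll ih => exact ih _ _ (gcdFoldl_inv _ _ _ h)

-- ===== VERDICT (by name: the statement is the Claim_ definition above) =====
theorem get_choice_dict_spec : Claim_equal_get_choice_dict := by
  intro vn_dict _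
  unfold Spec_get_choice_dict get_choice_dict get_choice_dict_alt
  obtain ⟨hkeys, hnd, hget⟩ :=
    gcdOuter_inv vn_dict PySem.Dict.empty PySem.Dict.empty
      ⟨rfl, List.nodup_nil, fun k => rfl⟩
  set d := vn_dict.foldl (fun d ref => ref.2.foldl gcdStepA d) PySem.Dict.empty
  set a := vn_dict.foldl (fun a ref => ref.2.foldl gcdStepB a) PySem.Dict.empty
  rw [PySem.Dict.items_eq_map_keys d (by rw [hkeys]; exact hnd) ([] : List String),
    PySem.Dict.items_eq_map_keys a hnd ([] : List String), hkeys, List.map_map]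
  exact List.map_congr_left fun k _ => by simp [hget k]
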